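-- pv_equiv track=rewrite | github.com/canit0221/code-kata | 프로그래머스/0/181893. 배열 조각하기/배열 조각하기.py | solution
-- ===== SOURCE A (Python) =====
-- def solution(arr, query):
--     answer = []
--
--     for i,j in enumerate(query):
--         if i%2 == 0:
--             arr = arr[:j+1]
--         else:
--             arr = arr[j:]
--
--     answer = arr
--     return answer
-- ===== SOURCE B (Python) =====
-- def solution(arr, query):
--     # Track window offsets [lo, hi) into the original arr; slice once at the end.
--     lo, hi = 0, len(arr)
--     for i, j in enumerate(query):
--         n = hi - lo
--         if i % 2 == 0:
--             k = j + 1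
--             if k < 0:
--                 k += n
--             k = max(0, min(k, n))
--             hi = lo + k
--         else:
--             k = j
--             if k < 0:
--                 k += n
--             k = max(0, min(k, n))
--             lo = lo + k
--     return arr[lo:hi]
-- ===== Notes on version B (the rewrite author's own statement) =====
-- stated objective: alternative
-- what changed: Instead of materialising a new list slice per query, B maintains integer window offsets (lo, hi) with Python's slice-clamping arithmetic and slices the original array once at the end.
import Mathlib
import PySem

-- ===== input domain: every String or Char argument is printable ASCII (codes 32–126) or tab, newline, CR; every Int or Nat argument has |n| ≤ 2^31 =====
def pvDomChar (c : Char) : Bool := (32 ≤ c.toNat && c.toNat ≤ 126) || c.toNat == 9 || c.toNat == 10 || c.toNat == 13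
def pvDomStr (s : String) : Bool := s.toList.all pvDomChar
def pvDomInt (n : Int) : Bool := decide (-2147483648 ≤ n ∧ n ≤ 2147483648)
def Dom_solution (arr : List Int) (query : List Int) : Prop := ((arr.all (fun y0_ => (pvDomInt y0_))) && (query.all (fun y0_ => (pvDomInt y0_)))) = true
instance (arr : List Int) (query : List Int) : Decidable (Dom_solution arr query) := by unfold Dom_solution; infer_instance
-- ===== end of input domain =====

-- B replaces per-query list slicing by window-offset bookkeeping with one final slice (alternative algorithm).


-- ===== PORT A =====
-- the 'for i, j in enumerate(query)' loop, carried as recursion with the running index i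
def solutionLoopA (arr : List Int) (query : List Int) (i : Nat) : List Int :=
  match query with
  | [] => arr
  | j :: rest =>
    let arr' := if i % 2 == 0 then PySem.List.slice arr none (some (j + 1))
                else PySem.List.slice arr (some j) none
    solutionLoopA arr' rest (i + 1)

def solution (arr : List Int) (query : List Int) : List Int :=
  let answer := solutionLoopA arr query 0
  answer

-- ===== PORT B =====
-- Source B's loop: window offsets (lo, hi), Python slice clamping done arithmetically
def solutionLoopB (lo hi : Int) (query : List Int) (i : Nat) : Int × Int :=
  match query with
  | [] => (lo, hi)
  | j :: rest =>
    let n := hi - lo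
    if i % 2 == 0 then
      let k := j + 1
      let k := if k < 0 then k + n else k
      let k := max 0 (min k n)
      solutionLoopB lo (lo + k) rest (i + 1)
    else
      let k := if j < 0 then j + n else j
      let k := max 0 (min k n)
      solutionLoopB (lo + k) hi rest (i + 1)

def solution_alt (arr : List Int) (query : List Int) : List Int :=
  let p := solutionLoopB 0 (arr.length : Int) query 0
  PySem.List.slice arr (some p.1) (some p.2)

-- ===== PRECONDITION & SPEC =====
def Spec_solution (arr : List Int) (query : List Int) (out : List Int) : Prop := out = solution_alt arr query
instance (arr : List Int) (query : List Int) (out : List Int) : Decidable (Spec_solution arr query out) := by unfold Spec_solution; infer_instance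

-- ===== CLAIM (what is proved, stated in full; the proofs are below) =====
def Claim_equal_solution : Prop := ∀ (arr : List Int) (query : List Int), Dom_solution arr query → Spec_solution arr query (solution arr query)

-- ===== LEMMAS AND PROOFS =====

theorem clampIdx_of_bounds (n : Nat) (i : Int) (h0 : 0 ≤ i) (h1 : i ≤ (n : Int)) :
    PySem.List.clampIdx n i = i.toNat := by
  unfold PySem.List.clampIdx; split_ifs <;> omega

theorem slice_nonneg_eq (arr : List Int) (lo hi : Int) (h0 : 0 ≤ lo) (h1 : lo ≤ hi)
    (h2 : hi ≤ (arr.length : Int)) :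
    PySem.List.slice arr (some lo) (some hi) = (arr.drop lo.toNat).take (hi.toNat - lo.toNat) := by
  simp only [PySem.List.slice]
  rw [clampIdx_of_bounds arr.length lo h0 (h1.trans h2),
      clampIdx_of_bounds arr.length hi (h0.trans h1) h2]

theorem length_window (arr : List Int) (lo hi : Int) (h0 : 0 ≤ lo) (h1 : lo ≤ hi)
    (h2 : hi ≤ (arr.length : Int)) :
    (PySem.List.slice arr (some lo) (some hi)).length = (hi - lo).toNat := by
  rw [slice_nonneg_eq arr lo hi h0 h1 h2]
  simp [List.length_take, List.length_drop]; omega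

theorem slice_none_some_eq (xs : List Int) (b : Int) :
    PySem.List.slice xs none (some b) = xs.take (PySem.List.clampIdx xs.length b) := by
  simp [PySem.List.slice]

theorem slice_some_none_eq (xs : List Int) (a : Int) :
    PySem.List.slice xs (some a) none = xs.drop (PySem.List.clampIdx xs.length a) := by
  simp only [PySem.List.slice]
  apply List.take_of_length_le
  simp

-- Python's clamped stop/start index equals B's arithmetic k
theorem clampIdx_eq_k (n b : Int) (hn : 0 ≤ n) :
    PySem.List.clampIdx n.toNat b = (max 0 (min (if b < 0 then b + n else b) n)).toNat := by
  unfold PySem.List.clampIdx; split_ifs <;> omega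

-- main invariant: running A's loop on the current window equals slicing arr at B's final offsets
theorem loop_eq (query : List Int) : ∀ (i : Nat) (lo hi : Int) (arr : List Int),
    0 ≤ lo → lo ≤ hi → hi ≤ (arr.length : Int) →
    solutionLoopA (PySem.List.slice arr (some lo) (some hi)) query i =
      PySem.List.slice arr (some (solutionLoopB lo hi query i).1) (some (solutionLoopB lo hi query i).2) := by
  induction query with
  | nil => intro i lo hi arr _ _ _; simp [solutionLoopA, solutionLoopB]
  | cons j rest ih =>
    intro i lo hi arr h0 h1 h2
    have hL : (PySem.List.slice arr (some lo) (some hi)).length = (hi - lo).toNat :=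
      length_window arr lo hi h0 h1 h2
    by_cases hp : i % 2 == 0
    · -- prefix step: arr = arr[:j+1]
      set n : Int := hi - lo with hn
      set x : Int := if j + 1 < 0 then j + 1 + n else j + 1 with hx
      set k : Int := max 0 (min x n) with hk
      have hk0 : 0 ≤ k := by omega
      have hkn : k ≤ n := by omega
      clear_value n x k
      have hstep : PySem.List.slice (PySem.List.slice arr (some lo) (some hi)) none (some (j + 1))
          = PySem.List.slice arr (some lo) (some (lo + k)) := by
        rw [slice_none_some_eq, hL, clampIdx_eq_k n (j + 1) (by omega), ← hx, ← hk,
            slice_nonneg_eq arr lo hi h0 h1 h2,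
            slice_nonneg_eq arr lo (lo + k) h0 (by omega) (by omega), List.take_take]
        congr 1
        omega
      simp only [solutionLoopA, solutionLoopB, hp, if_true, ← hn, ← hx, ← hk]
      rw [hstep]
      exact ih (i + 1) lo (lo + k) arr h0 (by omega) (by omega)
    · -- suffix step: arr = arr[j:]
      set n : Int := hi - lo with hn
      set x : Int := if j < 0 then j + n else j with hx
      set k : Int := max 0 (min x n) with hk
      have hk0 : 0 ≤ k := by omega
      have hkn : k ≤ n := by omega
      clear_value n x k
      have hstep : PySem.List.slice (PySem.List.slice arr (some lo) (some hi)) (some j) none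
          = PySem.List.slice arr (some (lo + k)) (some hi) := by
        rw [slice_some_none_eq, hL, clampIdx_eq_k n j (by omega), ← hx, ← hk,
            slice_nonneg_eq arr lo hi h0 h1 h2,
            slice_nonneg_eq arr (lo + k) hi (by omega) (by omega) h2,
            List.drop_take, List.drop_drop]
        congr 1
        · omega
        · congr 1
          omega
      simp only [solutionLoopA, solutionLoopB, hp, Bool.false_eq_true, if_false, ← hn, ← hx, ← hk]
      rw [hstep]
      exact ih (i + 1) (lo + k) hi arr (by omega) (by omega) h2

-- ===== VERDICT (by name: the statement is the Claim_ definition above) =====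
theorem solution_spec : Claim_equal_solution := by
  intro arr query _
  unfold Spec_solution solution solution_alt
  have h := loop_eq query 0 0 (arr.length : Int) arr le_rfl (by positivity) le_rfl
  rw [show PySem.List.slice arr (some 0) (some (arr.length : Int)) = arr from by
        rw [slice_nonneg_eq arr 0 (arr.length) le_rfl (by positivity) le_rfl]; simp] at h
  exact h
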